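-- pv_equiv track=rewrite | github.com/sun10081/leetcode_practice_xiaorui | questions/week/2021/2021_12_19/3_get_descent_periods.py | getDescentPeriods2
-- ===== SOURCE A (Python) =====
-- from typing import List
--
-- def getDescentPeriods2(prices: List[int]) -> int:
--     """
--     dp 滚动数组
--     :param prices:
--     :return:
--     """
--     n = len(prices)
--     if n == 1:
--         return 1
--     dp1 = 1
--     dp2 = 1
--     con = 1
--     for i in range(1, n):
--         if prices[i - 1] - prices[i] == 1:
--             con += 1
--         else:
--             con = 1
--         if con == 1:
--             dp2 = dp1 + 1
--         else:
--             dp2 = dp1 + con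
--         dp1 = dp2
--     return dp2
-- ===== SOURCE B (Python) =====
-- from typing import List
--
-- def getDescentPeriods2(prices: List[int]) -> int:
--     # Sum, over each maximal smooth-descent run, its triangular number run*(run+1)//2.
--     total = 0
--     run = 0
--     prev = None
--     for p in prices:
--         if prev is not None and prev - p == 1:
--             run += 1
--         else:
--             total += run * (run + 1) // 2
--             run = 1
--         prev = p
--     return total + run * (run + 1) // 2
-- ===== Notes on version B (the rewrite author's own statement) =====
-- stated objective: alternative
-- what changed: Replaced the rolling dp array indexed by range(1,n) with a single forward scan over the elements that detects maximal smooth-descent runs and adds each run's triangular number run*(run+1)//2.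
-- intended difference: On the empty list A returns 1 (leftover initial dp2=1, never updated) while B returns 0, the correct number of descent periods of an empty array. — e.g. on getDescentPeriods2([]): A returns 1, B returns 0
import Mathlib
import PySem

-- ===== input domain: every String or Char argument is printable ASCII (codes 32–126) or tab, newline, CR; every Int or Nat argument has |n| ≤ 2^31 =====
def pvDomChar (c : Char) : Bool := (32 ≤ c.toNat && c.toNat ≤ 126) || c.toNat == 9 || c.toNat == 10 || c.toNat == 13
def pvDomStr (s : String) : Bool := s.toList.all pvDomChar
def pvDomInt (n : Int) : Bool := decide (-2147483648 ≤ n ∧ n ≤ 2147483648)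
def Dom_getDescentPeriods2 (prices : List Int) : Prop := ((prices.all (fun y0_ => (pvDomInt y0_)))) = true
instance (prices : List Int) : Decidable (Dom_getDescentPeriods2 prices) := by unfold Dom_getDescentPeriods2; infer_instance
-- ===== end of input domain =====

-- B replaces A's rolling-dp loop over range(1,n) with a run-based scan summing triangular numbers; on [] B returns the correct 0 where A returns a leftover 1.

-- ===== PORT A =====
-- stepA is the loop body of A's 'for i in range(1, n)' (a named helper, same computation)
def stepA (prices : List Int) (s : Int × Int × Int) (i : Int) : Int × Int × Int :=
  let dp1 := s.1
  let con := s.2.2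
  let con := if (PySem.List.pyGetD prices (i - 1) 0) - (PySem.List.pyGetD prices i 0) = 1
             then con + 1 else 1
  let dp2 := if con = 1 then dp1 + 1 else dp1 + con
  (dp2, dp2, con)

def getDescentPeriods2 (prices : List Int) : Int :=
  let n : Int := prices.length
  if n = 1 then 1
  else
    let st := (PySem.List.pyRange 1 n 1).foldl (stepA prices) (1, 1, 1)
    st.2.1

-- ===== PORT B =====
def altGo (prev : Option Int) (run total : Int) : List Int → Int
  | [] => total + run * (run + 1) / 2
  | p :: rest =>
    if prev = some (p + 1) then altGo (some p) (run + 1) total rest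
    else altGo (some p) 1 (total + run * (run + 1) / 2) rest

def getDescentPeriods2_alt (prices : List Int) : Int := altGo none 0 0 prices

-- ===== PRECONDITION & SPEC =====
-- On the empty list A returns 1 (initial dp2=1 never updated); B returns 0, the correct count of descent periods of an empty array.
def D_getDescentPeriods2 (prices : List Int) : Prop := prices = []
instance (prices : List Int) : Decidable (D_getDescentPeriods2 prices) := by unfold D_getDescentPeriods2; infer_instance

def Spec_getDescentPeriods2 (prices : List Int) (out : Int) : Prop := ¬ D_getDescentPeriods2 prices → out = getDescentPeriods2_alt prices
instance (prices : List Int) (out : Int) : Decidable (Spec_getDescentPeriods2 prices out) := by unfold Spec_getDescentPeriods2; infer_instance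

def pvDiffWitness_getDescentPeriods2 : List Int := []
def pvDiffWitnessOut_getDescentPeriods2 : Int × Int := (1, 0)

-- ===== CLAIM (what is proved, stated in full; the proofs are below) =====
def Claim_unchanged_getDescentPeriods2 : Prop := ∀ (prices : List Int), Dom_getDescentPeriods2 prices → Spec_getDescentPeriods2 prices (getDescentPeriods2 prices)
def Claim_changed_getDescentPeriods2 : Prop := Dom_getDescentPeriods2 (pvDiffWitness_getDescentPeriods2) ∧ D_getDescentPeriods2 (pvDiffWitness_getDescentPeriods2) ∧ getDescentPeriods2 (pvDiffWitness_getDescentPeriods2) = pvDiffWitnessOut_getDescentPeriods2.1 ∧ getDescentPeriods2_alt (pvDiffWitness_getDescentPeriods2) = pvDiffWitnessOut_getDescentPeriods2.2 ∧ pvDiffWitnessOut_getDescentPeriods2.1 ≠ pvDiffWitnessOut_getDescentPeriods2.2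
def Claim_exact_getDescentPeriods2 : Prop := ∀ (prices : List Int), Dom_getDescentPeriods2 prices → D_getDescentPeriods2 prices → getDescentPeriods2 prices ≠ getDescentPeriods2_alt prices

-- ===== LEMMAS AND PROOFS =====

-- sum of the consecutive-descent run lengths ("con" values) over the remaining elements,
-- given previous element q and current run length r
def conSum (q r : Int) : List Int → Int
  | [] => 0
  | p :: rest => if q - p = 1 then (r + 1) + conSum p (r + 1) rest else 1 + conSum p 1 rest

theorem tri_succ (r : Int) : (r + 1) * (r + 1 + 1) / 2 = r * (r + 1) / 2 + (r + 1) := by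
  rw [show (r + 1) * (r + 1 + 1) = r * (r + 1) + (r + 1) * 2 by ring,
      Int.add_mul_ediv_right _ _ (by norm_num)]

theorem altGo_cons_pos (p r t : Int) (rest : List Int) :
    altGo (some (p + 1)) r t (p :: rest) = altGo (some p) (r + 1) t rest := by
  simp [altGo]

theorem altGo_cons_neg {q p : Int} (h : q ≠ p + 1) (r t : Int) (rest : List Int) :
    altGo (some q) r t (p :: rest) = altGo (some p) 1 (t + r * (r + 1) / 2) rest := by
  simp [altGo, h]

theorem altGo_eq (l : List Int) : ∀ (q r t : Int),
    altGo (some q) r t l = t + r * (r + 1) / 2 + conSum q r l := by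
  induction l with
  | nil => intro q r t; simp [altGo, conSum]
  | cons p rest ih =>
    intro q r t
    by_cases h : q - p = 1
    · have hq : q = p + 1 := by omega
      subst hq
      rw [altGo_cons_pos, ih, show conSum (p + 1) r (p :: rest) = (r + 1) + conSum p (r + 1) rest
            from by simp [conSum], tri_succ]
      ring
    · rw [altGo_cons_neg (by omega), ih, show conSum q r (p :: rest) = 1 + conSum p 1 rest
            from by simp [conSum, h]]
      ring

theorem stepA_pos (prices : List Int) (d c j : Int) (hc : 1 ≤ c)
    (h : PySem.List.pyGetD prices (j - 1) 0 - PySem.List.pyGetD prices j 0 = 1) :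
    stepA prices (d, d, c) j = (d + (c + 1), d + (c + 1), c + 1) := by
  simp [stepA, h, show ¬ (c + 1 = 1) by omega]

theorem stepA_neg (prices : List Int) (d c j : Int)
    (h : ¬ PySem.List.pyGetD prices (j - 1) 0 - PySem.List.pyGetD prices j 0 = 1) :
    stepA prices (d, d, c) j = (d + 1, d + 1, 1) := by
  simp [stepA, h]

theorem foldA_eq (l : List Int) : ∀ (prices : List Int) (i : Nat) (d c q : Int),
    1 ≤ i → 1 ≤ c → prices.drop i = l →
    PySem.List.pyGetD prices ((i : Int) - 1) 0 = q →
    ((PySem.List.pyRange i prices.length 1).foldl (stepA prices) (d, d, c)).2.1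
      = d + conSum q c l := by
  induction l with
  | nil =>
    intro prices i d c q hi hc hdrop hq
    have hlen : prices.length ≤ i := by
      by_contra h
      rw [List.drop_eq_nil_iff] at hdrop
      omega
    rw [PySem.List.pyRange_one_eq_nil (by exact_mod_cast hlen)]
    simp [conSum]
  | cons p rest ih =>
    intro prices i d c q hi hc hdrop hq
    have hilt : i < prices.length := by
      by_contra h
      rw [List.drop_eq_nil_iff.mpr (by omega)] at hdrop
      simp at hdrop
    have h1 : prices[i]? = some p := by
      have h2 : (prices.drop i)[0]? = prices[i + 0]? := List.getElem?_drop
      rw [hdrop] at h2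
      simpa using h2.symm
    have hp : PySem.List.pyGetD prices (i : Int) 0 = p := by
      rw [PySem.List.pyGetD_natCast]
      simp [List.getD, h1]
    have hdrop' : prices.drop (i + 1) = rest := by
      have h3 : prices.drop (i + 1) = (prices.drop i).drop 1 := by rw [List.drop_drop]
      simpa [hdrop] using h3
    have hq' : PySem.List.pyGetD prices (((i + 1 : Nat) : Int) - 1) 0 = p := by
      rw [show (((i + 1 : Nat)) : Int) - 1 = (i : Int) by push_cast; ring]
      exact hp
    rw [PySem.List.pyRange_one_cons (by exact_mod_cast hilt), List.foldl_cons]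
    by_cases h : PySem.List.pyGetD prices ((i : Int) - 1) 0 - PySem.List.pyGetD prices (i : Int) 0 = 1
    · have hqp : q - p = 1 := by rw [hq, hp] at h; exact h
      rw [stepA_pos prices d c (i : Int) hc h,
          show ((i : Int) + 1) = (((i + 1 : Nat)) : Int) by push_cast; ring,
          ih prices (i + 1) (d + (c + 1)) (c + 1) p (by omega) (by omega) hdrop' hq',
          show conSum q c (p :: rest) = (c + 1) + conSum p (c + 1) rest from by
            simp [conSum, hqp]]
      ring
    · have hqp : ¬ q - p = 1 := by rw [hq, hp] at h; exact h
      rw [stepA_neg prices d c (i : Int) h,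
          show ((i : Int) + 1) = (((i + 1 : Nat)) : Int) by push_cast; ring,
          ih prices (i + 1) (d + 1) 1 p (by omega) (by omega) hdrop' hq',
          show conSum q c (p :: rest) = 1 + conSum p 1 rest from by simp [conSum, hqp]]
      ring

theorem alt_cons (p : Int) (rest : List Int) :
    getDescentPeriods2_alt (p :: rest) = 1 + conSum p 1 rest := by
  have h0 : (none : Option Int) ≠ some (p + 1) := by simp
  rw [getDescentPeriods2_alt, show altGo none 0 0 (p :: rest)
        = altGo (some p) 1 (0 + 0 * (0 + 1) / 2) rest from by simp [altGo], altGo_eq]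
  norm_num

-- ===== VERDICT (by name: the statement is the Claim_ definition above) =====
theorem getDescentPeriods2_spec : Claim_unchanged_getDescentPeriods2 := by
  intro prices _ hD
  match prices, hD with
  | [], hD => exact absurd rfl hD
  | p :: rest, _ =>
    have hq : PySem.List.pyGetD (p :: rest) ((1 : Int) - 1) 0 = p := by
      norm_num [PySem.List.pyGetD]
    by_cases h1 : rest = []
    · subst h1
      simp [getDescentPeriods2, alt_cons, conSum]
    · have hn : ¬ ((((p :: rest).length : Int)) = 1) := by
        simp only [List.length_cons]
        have : rest.length ≠ 0 := by simpa using h1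
        omega
      unfold getDescentPeriods2
      simp only [if_neg hn]
      have hmain := foldA_eq rest (p :: rest) 1 1 1 p (le_refl 1) (le_refl 1) (by simp)
        (by exact_mod_cast hq)
      simp only [Nat.cast_one] at hmain
      rw [hmain, alt_cons]

theorem getDescentPeriods2_changed : Claim_changed_getDescentPeriods2 := by
  unfold Claim_changed_getDescentPeriods2; decide

theorem getDescentPeriods2_tight : Claim_exact_getDescentPeriods2 := by
  intro prices _ hD
  subst hD
  decide
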